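-- pv_equiv track=rewrite | github.com/Shivanandpal/PathFinder | backend/utils/matcher.py | match_role
-- ===== SOURCE A (Python) =====
-- def match_role(user_skills, roles_data):
--     user_skills = [skill.strip().lower() for skill in user_skills.split(",")]
--
--     best_match = None
--     max_match = 0
--
--     for role, data in roles_data.items():
--         required = [s.lower() for s in data["skills_required"]]
--         match_count = len(set(user_skills) & set(required))
--
--         if match_count > max_match:
--             max_match = match_count
--             best_match = role
--
--     return best_match, max_match
-- ===== SOURCE B (Python) =====
-- def match_role(user_skills, roles_data):
--     # Inverted index: skill -> roles requiring it; count matches per role in one pass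
--     # over the distinct user skills, then pick the first role with the strict maximum.
--     user_set = dict.fromkeys(s.strip().lower() for s in user_skills.split(","))
--     index = {}
--     for role, data in roles_data.items():
--         for skill in dict.fromkeys(s.lower() for s in data["skills_required"]):
--             index[skill] = index.get(skill, []) + [role]
--     counts = {}
--     for skill in user_set:
--         for role in index.get(skill, ()):
--             counts[role] = counts.get(role, 0) + 1
--     best_match, max_match = None, 0
--     for role in roles_data:
--         c = counts.get(role, 0)
--         if c > max_match:
--             best_match, max_match = role, c
--     return best_match, max_match
-- ===== Notes on version B (the rewrite author's own statement) =====
-- stated objective: faster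
-- what changed: B builds an inverted index skill->roles and a per-role match counter driven by the distinct user skills, instead of A's per-role set intersection that re-builds set(user_skills) for every role; Pre_ additionally requires distinct role keys (guaranteed for a Python dict) and that every role's data has the 'skills_required' key (A raises KeyError otherwise, and B raises too).
import Mathlib
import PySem

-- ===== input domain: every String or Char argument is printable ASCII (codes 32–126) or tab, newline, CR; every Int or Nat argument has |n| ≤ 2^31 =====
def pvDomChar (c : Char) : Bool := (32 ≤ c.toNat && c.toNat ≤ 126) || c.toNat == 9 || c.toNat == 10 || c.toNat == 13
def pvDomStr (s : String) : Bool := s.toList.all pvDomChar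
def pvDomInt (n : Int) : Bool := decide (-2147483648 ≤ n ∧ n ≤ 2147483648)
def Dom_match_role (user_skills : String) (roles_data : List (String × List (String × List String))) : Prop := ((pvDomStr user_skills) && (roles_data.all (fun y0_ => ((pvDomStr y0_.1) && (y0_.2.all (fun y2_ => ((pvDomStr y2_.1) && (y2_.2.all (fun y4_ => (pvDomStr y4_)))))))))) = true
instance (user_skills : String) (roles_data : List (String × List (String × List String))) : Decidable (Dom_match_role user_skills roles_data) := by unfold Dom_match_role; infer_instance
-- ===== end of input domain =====

-- B replaces A's per-role set intersections (set(user_skills) rebuilt for every role) by an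
-- inverted index skill -> roles plus a per-role counter, then the same first-strict-max scan.

-- ===== PORT A =====
def match_role (user_skills : String) (roles_data : List (String × List (String × List String))) : Option String × Int :=
  let us := ((PySem.Str.split? user_skills ",").getD []).map (fun s => PySem.Str.lower (PySem.Str.strip s))
  roles_data.foldl (fun st p =>
    let required := ((PySem.Dict.mk p.2).getD "skills_required" []).map PySem.Str.lower
    let c : Int := ((PySem.Set.inter (PySem.Set.ofList us) (PySem.Set.ofList required)).length : Int)
    if st.2 < c then (some p.1, c) else st) (none, 0)

-- ===== PORT B =====
-- B-side helper: the lowered, de-duplicated required-skill list of one roles_data entry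
def pvReqd (p : String × List (String × List String)) : List String :=
  PySem.List.dedup (((PySem.Dict.mk p.2).getD "skills_required" []).map PySem.Str.lower)

def match_role_alt (user_skills : String) (roles_data : List (String × List (String × List String))) : Option String × Int :=
  let userSet := PySem.List.dedup (((PySem.Str.split? user_skills ",").getD []).map (fun s => PySem.Str.lower (PySem.Str.strip s)))
  let index : PySem.Dict String (List String) := roles_data.foldl (fun d p =>
      (pvReqd p).foldl (fun d s => d.insert s (d.getD s [] ++ [p.1])) d) PySem.Dict.empty
  let counts : PySem.Dict String Int := userSet.foldl (fun c s =>
      (index.getD s []).foldl (fun c r => c.insert r (c.getD r 0 + 1)) c) PySem.Dict.empty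
  roles_data.foldl (fun st p =>
      let c := counts.getD p.1 0
      if st.2 < c then (some p.1, c) else st) (none, 0)

-- ===== PRECONDITION & SPEC =====
-- Pre_ excludes inputs on which A raises KeyError (a role's data lacking the "skills_required"
-- key; B raises there too) and assoc lists with duplicate role keys, which cannot arise from a
-- Python dict (dict keys are unique).
def Pre_match_role (user_skills : String) (roles_data : List (String × List (String × List String))) : Prop :=
  (roles_data.map Prod.fst).Nodup ∧
  ∀ p ∈ roles_data, (PySem.Dict.mk p.2).contains "skills_required" = true
instance (user_skills : String) (roles_data : List (String × List (String × List String))) : Decidable (Pre_match_role user_skills roles_data) := by unfold Pre_match_role; infer_instance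

def pvWitness_match_role : String × (List (String × List (String × List String))) :=
  ("Python, SQL", [("Data Analyst", [("skills_required", ["python", "Excel"])]), ("Backend", [("skills_required", ["Go"])])])

def Spec_match_role (user_skills : String) (roles_data : List (String × List (String × List String))) (out : Option String × Int) : Prop := out = match_role_alt user_skills roles_data
instance (user_skills : String) (roles_data : List (String × List (String × List String))) (out : Option String × Int) : Decidable (Spec_match_role user_skills roles_data out) := by unfold Spec_match_role; infer_instance

-- ===== CLAIM (what is proved, stated in full; the proofs are below) =====
def Claim_equal_match_role : Prop := ∀ (user_skills : String) (roles_data : List (String × List (String × List String))), Dom_match_role user_skills roles_data → Pre_match_role user_skills roles_data → Spec_match_role user_skills roles_data (match_role user_skills roles_data)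

-- ===== LEMMAS AND PROOFS =====

-- inner index-building loop: appends r under exactly the keys in L (L nodup)
theorem pv_idx_inner (L : List String) (r : String) (d : PySem.Dict String (List String)) (q : String)
    (hL : L.Nodup) :
    ((L.foldl (fun d s => d.insert s (d.getD s [] ++ [r])) d).getD q []) =
      (if q ∈ L then d.getD q [] ++ [r] else d.getD q []) := by
  induction L generalizing d with
  | nil => simp
  | cons s L ih =>
    have hnd : L.Nodup := hL.of_cons
    have hs : s ∉ L := (List.nodup_cons.mp hL).1
    rw [List.foldl_cons, ih _ hnd]
    by_cases hq : q = s
    · subst hq; simp [hs]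
    · by_cases hqL : q ∈ L <;> simp [hq, hqL, PySem.Dict.getD_insert]

-- outer index-building loop: the index list under key q is the roles requiring q, in order
theorem pv_idx_outer (rd : List (String × List (String × List String)))
    (d : PySem.Dict String (List String)) (q : String) :
    ((rd.foldl (fun d p => (pvReqd p).foldl (fun d s => d.insert s (d.getD s [] ++ [p.1])) d) d).getD q []) =
      d.getD q [] ++ (rd.filter (fun p => decide (q ∈ pvReqd p))).map Prod.fst := by
  induction rd generalizing d with
  | nil => simp
  | cons p rd ih =>
    have hnp : (pvReqd p).Nodup := PySem.List.nodup_dedup _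
    rw [List.foldl_cons, ih, pv_idx_inner _ _ _ _ hnp]
    by_cases hq : q ∈ pvReqd p
    · simp [hq]
    · simp [hq]

-- counting loop over the distinct user skills
theorem pv_counts (U : List String) (idx : String → List String)
    (c : PySem.Dict String Int) (v : String) :
    ((U.foldl (fun c s => (idx s).foldl (fun c r => c.insert r (c.getD r 0 + 1)) c) c).getD v 0) =
      c.getD v 0 + ((U.map (fun s => ((idx s).count v : Int))).sum) := by
  induction U generalizing c with
  | nil => simp
  | cons s U ih =>
    rw [List.foldl_cons, ih, PySem.Dict.getD_foldl_insert_add_one]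
    rw [List.map_cons, List.sum_cons]
    ring

-- with unique role keys, an entry's role occurs in the filtered role list once iff the entry passes
theorem pv_count_filter (rd : List (String × List (String × List String)))
    (P : (String × List (String × List String)) → Bool)
    (e : String × List (String × List String)) (he : e ∈ rd) (hnd : (rd.map Prod.fst).Nodup) :
    ((rd.filter P).map Prod.fst).count e.1 = (if P e then 1 else 0) := by
  induction rd with
  | nil => cases he
  | cons q rd ih =>
    have hnd' : (rd.map Prod.fst).Nodup := (List.nodup_cons.mp (by simpa using hnd)).2
    have hq1 : q.1 ∉ rd.map Prod.fst := (List.nodup_cons.mp (by simpa using hnd)).1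
    rcases List.mem_cons.mp he with h | h
    · subst h
      have hz : ((rd.filter P).map Prod.fst).count e.1 = 0 := by
        refine List.count_eq_zero.mpr ?_
        intro hmem
        exact hq1 (by
          rcases List.mem_map.mp hmem with ⟨x, hx, hfx⟩
          exact List.mem_map.mpr ⟨x, List.mem_of_mem_filter hx, hfx⟩)
      by_cases hP : P e
      · simp [hP, hz]
      · simp [hP, hz]
    · have hne : e.1 ≠ q.1 := by
        intro hee
        exact hq1 (hee ▸ List.mem_map.mpr ⟨e, h, rfl⟩)
      by_cases hP : P q
      · simp [hP, hne.symm, ih h hnd']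
      · simp [hP, ih h hnd']

-- A's per-entry intersection size equals B's per-entry counter value
theorem pv_entry (us : List String) (rd : List (String × List (String × List String)))
    (e : String × List (String × List String)) (he : e ∈ rd) (hnd : (rd.map Prod.fst).Nodup) :
    (((PySem.List.dedup us).foldl (fun c s =>
        (((rd.foldl (fun d p => (pvReqd p).foldl (fun d s => d.insert s (d.getD s [] ++ [p.1])) d) PySem.Dict.empty)).getD s []).foldl
          (fun c r => c.insert r (c.getD r 0 + 1)) c) PySem.Dict.empty).getD e.1 0) =
      (((PySem.Set.inter (PySem.Set.ofList us)
          (PySem.Set.ofList (((PySem.Dict.mk e.2).getD "skills_required" []).map PySem.Str.lower))).length : Int)) := by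
  rw [pv_counts (PySem.List.dedup us)
      (fun s => ((rd.foldl (fun d p => (pvReqd p).foldl (fun d s => d.insert s (d.getD s [] ++ [p.1])) d) PySem.Dict.empty)).getD s [])
      PySem.Dict.empty e.1]
  rw [PySem.Dict.getD_empty, zero_add]
  have h1 : ∀ s ∈ PySem.List.dedup us,
      ((((rd.foldl (fun d p => (pvReqd p).foldl (fun d s => d.insert s (d.getD s [] ++ [p.1])) d) PySem.Dict.empty)).getD s []).count e.1 : Int)
        = (if decide (s ∈ pvReqd e) = true then 1 else 0) := by
    intro s _
    rw [pv_idx_outer]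
    rw [PySem.Dict.getD_empty, List.nil_append]
    rw [pv_count_filter rd _ e he hnd]
    split_ifs <;> simp
  rw [List.map_congr_left h1, PySem.List.sum_map_ite_one_zero]
  congr 1
  rw [List.countP_eq_length_filter]
  show _ = (PySem.Set.inter (PySem.List.dedup us) _).length
  unfold PySem.Set.inter
  congr 1
  refine List.filter_congr ?_
  intro x _
  simp [pvReqd]

-- ===== VERDICT (by name: the statement is the Claim_ definition above) =====
theorem match_role_spec : Claim_equal_match_role := by
  intro us rd _ hPre
  show match_role us rd = match_role_alt us rd
  unfold match_role match_role_alt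
  refine PySem.List.foldl_congr_mem rd _ _ _ ?_
  intro acc p hp
  rw [pv_entry _ rd p hp hPre.1]
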